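-- pv_equiv track=rewrite | github.com/QIANJINYDX/ViroBench | CUR_TEST/gen_eval_evo2_halfprompt.py | clean_seq_basic
-- ===== SOURCE A (Python) =====
-- def clean_seq_basic(seq: str) -> str:
--     # 将 U 视为 T，其它 IUPAC 统一变 N
--     seq = seq.upper().replace("U", "T")
--     out = []
--     for ch in seq:
--         if ch in ("A", "C", "G", "T", "N"):
--             out.append(ch)
--         else:
--             out.append("N")
--     return "".join(out)
-- ===== SOURCE B (Python) =====
-- import re
--
-- def clean_seq_basic(seq: str) -> str:
--     # U counts as T; every other non-ACGTN character becomes N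
--     s = seq.upper().replace("U", "T")
--     return re.sub(r"[^ACGTN]", "N", s)
-- ===== Notes on version B (the rewrite author's own statement) =====
-- stated objective: idiomatic
-- what changed: Replaces the explicit per-character loop with membership test and list-append by a single regex substitution (a complemented character class mapping every non-nucleotide character to the placeholder) after the same upper/U-to-T preamble.
import Mathlib
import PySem

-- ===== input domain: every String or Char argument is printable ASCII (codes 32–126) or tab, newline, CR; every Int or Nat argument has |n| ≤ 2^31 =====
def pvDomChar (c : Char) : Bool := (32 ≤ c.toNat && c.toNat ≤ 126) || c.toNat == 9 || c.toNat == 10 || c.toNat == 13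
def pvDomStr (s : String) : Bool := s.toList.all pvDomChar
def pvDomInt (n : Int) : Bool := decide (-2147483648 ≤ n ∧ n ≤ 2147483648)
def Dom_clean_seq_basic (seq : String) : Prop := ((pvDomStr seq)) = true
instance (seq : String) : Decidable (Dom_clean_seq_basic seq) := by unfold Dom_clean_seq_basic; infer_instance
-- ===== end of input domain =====

-- B replaces A's explicit loop/membership/append normalization by one regex substitution (idiomatic, same cost).

-- ===== PORT A =====
def clean_seq_basic (seq : String) : String :=
  let s := PySem.Str.replace (PySem.Str.upper seq) "U" "T"
  let out := s.toList.foldl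
    (fun acc ch =>
      if ch = 'A' ∨ ch = 'C' ∨ ch = 'G' ∨ ch = 'T' ∨ ch = 'N' then
        acc ++ [String.ofList [ch]]
      else
        acc ++ ["N"]) []
  PySem.Str.join "" out

-- ===== PORT B =====
-- re.sub(r"[^ACGTN]", "N", s) ported by hand: the pattern matches exactly the single
-- characters outside {A,C,G,T,N}, so the substitution is a per-character map (exact here).
def clean_seq_basic_alt (seq : String) : String :=
  let s := PySem.Str.replace (PySem.Str.upper seq) "U" "T"
  String.ofList (s.toList.map (fun c => if c ∈ ['A','C','G','T','N'] then c else 'N'))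

-- ===== PRECONDITION & SPEC =====
def Spec_clean_seq_basic (seq : String) (out : String) : Prop := out = clean_seq_basic_alt seq
instance (seq : String) (out : String) : Decidable (Spec_clean_seq_basic seq out) := by unfold Spec_clean_seq_basic; infer_instance

-- ===== CLAIM (what is proved, stated in full; the proofs are below) =====
def Claim_equal_clean_seq_basic : Prop := ∀ (seq : String), Dom_clean_seq_basic seq → Spec_clean_seq_basic seq (clean_seq_basic seq)

-- ===== LEMMAS AND PROOFS =====

-- the per-character function both sides compute
theorem pv_join_singletons (cs : List Char) :
    PySem.Str.join "" (cs.map (fun c => String.ofList [c])) = String.ofList cs := by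
  apply String.toList_inj.mp
  simp only [PySem.Str.toList_join, List.map_map, Function.comp_def, String.toList_ofList,
    String.toList_empty]
  exact PySem.Chars.join_nil_singletons cs

theorem pv_core (l : List Char) :
    PySem.Str.join ""
      (l.foldl (fun acc ch =>
        if ch = 'A' ∨ ch = 'C' ∨ ch = 'G' ∨ ch = 'T' ∨ ch = 'N' then
          acc ++ [String.ofList [ch]]
        else
          acc ++ ["N"]) [])
    = String.ofList (l.map (fun c => if c ∈ ['A','C','G','T','N'] then c else 'N')) := by
  have hfold :
      (l.foldl (fun acc ch =>
        if ch = 'A' ∨ ch = 'C' ∨ ch = 'G' ∨ ch = 'T' ∨ ch = 'N' then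
          acc ++ [String.ofList [ch]]
        else
          acc ++ ["N"]) [])
      = l.map (fun ch => String.ofList [if ch ∈ ['A','C','G','T','N'] then ch else 'N']) := by
    have hcongr := PySem.List.foldl_congr_mem (l := l)
      (f := fun acc ch =>
        if ch = 'A' ∨ ch = 'C' ∨ ch = 'G' ∨ ch = 'T' ∨ ch = 'N' then
          acc ++ [String.ofList [ch]]
        else
          acc ++ ["N"])
      (g := fun acc ch => acc ++ [String.ofList [if ch ∈ ['A','C','G','T','N'] then ch else 'N']])
      (init := ([] : List String))
      (by
        intro acc ch _
        by_cases h : ch = 'A' ∨ ch = 'C' ∨ ch = 'G' ∨ ch = 'T' ∨ ch = 'N' <;>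
          simp [h, List.mem_cons] at *)
    rw [hcongr]
    simpa using PySem.List.foldl_append_singleton_eq_map
      (f := fun ch => String.ofList [if ch ∈ ['A','C','G','T','N'] then ch else 'N']) (l := l) []
  rw [hfold,
    show (fun ch => String.ofList [if ch ∈ ['A','C','G','T','N'] then ch else 'N'])
        = (fun c => String.ofList [c]) ∘ (fun c => if c ∈ ['A','C','G','T','N'] then c else 'N')
      from rfl,
    ← List.map_map]
  exact pv_join_singletons _

-- ===== VERDICT (by name: the statement is the Claim_ definition above) =====
theorem clean_seq_basic_spec : Claim_equal_clean_seq_basic := by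
  intro seq _
  unfold Spec_clean_seq_basic clean_seq_basic clean_seq_basic_alt
  exact pv_core _
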